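-- pv_equiv track=rewrite | github.com/agnesedaniele/GridPythonModule | GridPythonModule/GridPyM.py | generate_unlink
-- ===== SOURCE A (Python) =====
-- def generate_unlink(link_components):
--     r"""
--     Generates a specific unlink diagram with the specified number of components.
--
--     OUTPUT:
--
--     A grid diagram representing the unlink.
--
--     EXAMPLES::
--
--     >> G = generate_unlink(5)
--     >> number_of_components(G)
--     5
--
--     """
--     if link_components < 1:
--         raise Exception("The number of components needs to be positive!")
--     second_aux = []
--     for ii in range(2*link_components):
--         if ii%2 == 0:
--             second_aux.append((ii+1)%(2*link_components))
--         else: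
--             second_aux.append(ii-1)
--     return [[ii for ii in range(2*link_components)], second_aux]
-- ===== SOURCE B (Python) =====
-- def generate_unlink(link_components):
--     if link_components < 1:
--         raise Exception("The number of components needs to be positive!")
--     evens = list(range(0, 2 * link_components, 2))
--     odds = list(range(1, 2 * link_components, 2))
--     first = [x for pair in zip(evens, odds) for x in pair]
--     second = [x for pair in zip(odds, evens) for x in pair]
--     return [first, second]
-- ===== Notes on version B (the rewrite author's own statement) =====
-- stated objective: alternative
-- what changed: Builds the even and odd index sequences as two stride-2 ranges and produces both output rows by interleaving them with zip (in the two orders), instead of one index loop with a parity branch and a modulo.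
-- outside the precondition, e.g. on generate_unlink(0): A raises Exception, B raises Exception
import Mathlib
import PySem

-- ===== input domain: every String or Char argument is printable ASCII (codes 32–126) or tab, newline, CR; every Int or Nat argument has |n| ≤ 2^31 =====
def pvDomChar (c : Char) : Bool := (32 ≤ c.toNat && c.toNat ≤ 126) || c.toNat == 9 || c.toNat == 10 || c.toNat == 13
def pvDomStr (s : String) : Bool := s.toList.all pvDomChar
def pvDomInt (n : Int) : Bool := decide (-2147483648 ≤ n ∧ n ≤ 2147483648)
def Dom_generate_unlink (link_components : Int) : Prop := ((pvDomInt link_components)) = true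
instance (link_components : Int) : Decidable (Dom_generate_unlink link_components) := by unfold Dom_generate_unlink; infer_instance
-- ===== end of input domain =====

-- B: builds the even and odd index sequences as two stride-2 ranges and interleaves them with zip, in both orders.

-- ===== PORT A =====
def generate_unlink (link_components : Int) : List (List Int) :=
  if link_components < 1 then []  -- Python raises here; excluded by Pre_
  else
    let second_aux := (PySem.List.pyRange 0 (2 * link_components) 1).foldl
      (fun acc ii =>
        if PySem.Int.mod ii 2 = 0 then acc ++ [PySem.Int.mod (ii + 1) (2 * link_components)]
        else acc ++ [ii - 1]) []
    [PySem.List.pyRange 0 (2 * link_components) 1, second_aux]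

-- ===== PORT B =====
def generate_unlink_alt (link_components : Int) : List (List Int) :=
  if link_components < 1 then []  -- Python raises here; excluded by Pre_
  else
    let evens := PySem.List.pyRange 0 (2 * link_components) 2
    let odds := PySem.List.pyRange 1 (2 * link_components) 2
    let first := (evens.zip odds).flatMap (fun p => [p.1, p.2])
    let second := (odds.zip evens).flatMap (fun p => [p.1, p.2])
    [first, second]

-- ===== PRECONDITION & SPEC =====
-- Pre_ excludes link_components < 1, on which both A and B raise Exception.
def Pre_generate_unlink (link_components : Int) : Prop := 1 ≤ link_components
instance (link_components : Int) : Decidable (Pre_generate_unlink link_components) := by unfold Pre_generate_unlink; infer_instance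
def pvWitness_generate_unlink : Int := 3

def Spec_generate_unlink (link_components : Int) (out : List (List Int)) : Prop := out = generate_unlink_alt link_components
instance (link_components : Int) (out : List (List Int)) : Decidable (Spec_generate_unlink link_components out) := by unfold Spec_generate_unlink; infer_instance

-- ===== CLAIM =====
def Claim_equal_generate_unlink : Prop := ∀ (link_components : Int), Dom_generate_unlink link_components → Pre_generate_unlink link_components → Spec_generate_unlink link_components (generate_unlink link_components)

-- ===== LEMMAS AND PROOFS =====

-- the two stride-2 ranges of B as maps over List.range
lemma evens_eq (m : Nat) (hm : 1 ≤ m) :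
    PySem.List.pyRange 0 (2 * (m : Int)) 2 = (List.range m).map (fun k : Nat => 2 * (k : Int)) := by
  rw [PySem.List.pyRange_of_pos 0 (2 * (m : Int)) (by norm_num)]
  have h : (0 : Int) < 2 * (m : Int) := by positivity
  rw [if_pos h]
  have : ((2 * (m : Int) - 0 + 2 - 1) / 2).toNat = m := by omega
  rw [this]
  exact List.map_congr_left (fun k _ => by ring)

lemma odds_eq (m : Nat) (hm : 1 ≤ m) :
    PySem.List.pyRange 1 (2 * (m : Int)) 2 = (List.range m).map (fun k : Nat => 2 * (k : Int) + 1) := by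
  rw [PySem.List.pyRange_of_pos 1 (2 * (m : Int)) (by norm_num)]
  have h : (1 : Int) < 2 * (m : Int) := by omega
  rw [if_pos h]
  have : ((2 * (m : Int) - 1 + 2 - 1) / 2).toNat = m := by omega
  rw [this]
  exact List.map_congr_left (fun k _ => by ring)

-- interleaving two maps over the same range = flatMap of the pair of maps
lemma zip_map_flatMap {α : Type} (l : List α) (f g : α → Int) :
    ((l.map f).zip (l.map g)).flatMap (fun p => [p.1, p.2])
      = l.flatMap (fun k => [f k, g k]) := by
  induction l with
  | nil => rfl
  | cons x xs ih => simp [List.flatMap_cons, ih]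

lemma flatMap_first (m : Nat) :
    (List.range m).flatMap (fun k : Nat => [2 * (k : Int), 2 * (k : Int) + 1])
      = PySem.List.pyRange 0 (2 * (m : Int)) 1 := by
  induction m with
  | zero => simp
  | succ m ih =>
    rw [List.range_succ, List.flatMap_append,
      show (2 : Int) * ((m + 1 : Nat) : Int) = 2 * (m : Int) + 1 + 1 by push_cast; ring,
      PySem.List.pyRange_one_succ_right (by positivity),
      PySem.List.pyRange_one_succ_right (by positivity)]
    simp [ih]

lemma flatMap_second (m : Nat) :
    (List.range m).flatMap (fun k : Nat => [2 * (k : Int) + 1, 2 * (k : Int)])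
      = (PySem.List.pyRange 0 (2 * (m : Int)) 1).map
          (fun ii => if ii % 2 = 0 then ii + 1 else ii - 1) := by
  induction m with
  | zero => simp
  | succ m ih =>
    rw [List.range_succ, List.flatMap_append,
      show (2 : Int) * ((m + 1 : Nat) : Int) = 2 * (m : Int) + 1 + 1 by push_cast; ring,
      PySem.List.pyRange_one_succ_right (by positivity),
      PySem.List.pyRange_one_succ_right (by positivity)]
    have h1 : (2 : Int) ∣ 2 * (m : Int) := ⟨m, rfl⟩
    have h2 : ¬ (2 : Int) ∣ (2 * (m : Int) + 1) := by omega
    simp [ih, h1, h2]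

-- A's second fold, with the parity test and the no-op modulo simplified away
lemma a_second_eq (n : Int) (hn : 1 ≤ n) :
    (PySem.List.pyRange 0 (2 * n) 1).foldl
      (fun acc ii =>
        if PySem.Int.mod ii 2 = 0 then acc ++ [PySem.Int.mod (ii + 1) (2 * n)]
        else acc ++ [ii - 1]) []
      = (PySem.List.pyRange 0 (2 * n) 1).map
          (fun ii => if ii % 2 = 0 then ii + 1 else ii - 1) := by
  rw [PySem.List.foldl_congr_mem'
      (g := fun acc ii => acc ++ [if ii % 2 = 0 then ii + 1 else ii - 1])]
  · rw [PySem.List.foldl_append_eq_flatMap]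
    simp only [List.nil_append]
    exact (List.map_eq_flatMap).symm
  · intro x hx acc
    rw [PySem.List.mem_pyRange_one] at hx
    rw [PySem.Int.mod_eq_emod_of_pos (show (0:Int) < 2 by omega)]
    split_ifs with h
    · have hx1 : x + 1 < 2 * n := by omega
      rw [PySem.Int.mod_eq_emod_of_pos (show (0:Int) < 2*n by omega), Int.emod_eq_of_lt (by omega) hx1]
    · rfl

-- ===== VERDICT =====
theorem generate_unlink_spec : Claim_equal_generate_unlink := by
  intro n _ hpre
  have hn : 1 ≤ n := hpre
  unfold Spec_generate_unlink generate_unlink generate_unlink_alt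
  rw [if_neg (by omega), if_neg (by omega)]
  obtain ⟨m, rfl⟩ : ∃ m : Nat, n = (m : Int) := ⟨n.toNat, by omega⟩
  have hm : 1 ≤ m := by exact_mod_cast hn
  have hfirst : ((PySem.List.pyRange 0 (2 * (m : Int)) 2).zip
        (PySem.List.pyRange 1 (2 * (m : Int)) 2)).flatMap (fun p => [p.1, p.2])
      = PySem.List.pyRange 0 (2 * (m : Int)) 1 := by
    rw [evens_eq m hm, odds_eq m hm,
      zip_map_flatMap (List.range m) (fun k : Nat => 2 * (k : Int)) (fun k : Nat => 2 * (k : Int) + 1),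
      flatMap_first]
  have hsecond : ((PySem.List.pyRange 1 (2 * (m : Int)) 2).zip
        (PySem.List.pyRange 0 (2 * (m : Int)) 2)).flatMap (fun p => [p.1, p.2])
      = (PySem.List.pyRange 0 (2 * (m : Int)) 1).map
          (fun ii => if ii % 2 = 0 then ii + 1 else ii - 1) := by
    rw [evens_eq m hm, odds_eq m hm,
      zip_map_flatMap (List.range m) (fun k : Nat => 2 * (k : Int) + 1) (fun k : Nat => 2 * (k : Int)),
      flatMap_second]
  simp only [hfirst, hsecond, a_second_eq _ hn]
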